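-- pv_equiv track=rewrite | github.com/japaf/anfoam_rec | foam_geoextractor.py | updateEntity
-- ===== SOURCE A (Python) =====
-- def updateEntity(addList,delList,entity):
--     for item in delList:
--         for i in range(len(entity)):
--             if (abs(entity[i])==item):
--                 entity.pop(i)
--                 break
--     for item in addList:
--         entity.append(item)
--     return entity
-- ===== SOURCE B (Python) =====
-- def updateEntity(addList, delList, entity):
--     # Single pass with a count of pending deletions per abs-value (mutates entity in place, like A).
--     need = {}
--     for item in delList:
--         need[item] = need.get(item, 0) + 1
--     kept = []
--     for v in entity:
--         a = abs(v)
--         c = need.get(a, 0)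
--         if c > 0:
--             need[a] = c - 1
--         else:
--             kept.append(v)
--     entity[:] = kept
--     entity.extend(addList)
--     return entity
-- ===== Notes on version B (the rewrite author's own statement) =====
-- stated objective: faster
-- what changed: Replaces the per-delete linear rescan of entity (pop first abs-match per delList item) by one pass: count delList into a dict, then a single sweep over entity dropping the first count[abs(v)] occurrences of each abs-value, then extend with addList.
import Mathlib
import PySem

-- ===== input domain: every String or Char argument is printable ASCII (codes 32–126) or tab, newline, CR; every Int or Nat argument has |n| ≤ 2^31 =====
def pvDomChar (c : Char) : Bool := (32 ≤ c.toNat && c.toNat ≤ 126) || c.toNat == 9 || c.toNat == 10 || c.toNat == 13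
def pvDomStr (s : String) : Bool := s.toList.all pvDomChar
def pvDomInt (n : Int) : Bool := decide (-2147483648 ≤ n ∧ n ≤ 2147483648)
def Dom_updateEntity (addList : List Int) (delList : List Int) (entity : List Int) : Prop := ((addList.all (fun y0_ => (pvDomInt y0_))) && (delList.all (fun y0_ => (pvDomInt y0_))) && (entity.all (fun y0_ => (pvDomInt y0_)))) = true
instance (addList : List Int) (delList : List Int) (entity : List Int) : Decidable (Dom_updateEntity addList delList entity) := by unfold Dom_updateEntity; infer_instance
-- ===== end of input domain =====

-- B replaces A's per-delete rescans of entity by counting delList once and one sweep over entity;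
-- both Pythons mutate `entity` in place identically, the equivalence proved here is about the return value.

-- ===== PORT A =====
def pyAbs (n : Int) : Int := if n < 0 then -n else n

-- A's inner `for i in range(len(entity)) … pop(i); break` removes the first element whose abs equals item.
def eraseFirstAbs (item : Int) : List Int → List Int
  | [] => []
  | x :: xs => if pyAbs x = item then xs else x :: eraseFirstAbs item xs

def updateEntity (addList : List Int) (delList : List Int) (entity : List Int) : List Int :=
  (delList.foldl (fun e item => eraseFirstAbs item e) entity) ++ addList

-- ===== PORT B =====
def updateEntity_alt (addList : List Int) (delList : List Int) (entity : List Int) : List Int :=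
  let need : PySem.Dict Int Int :=
    delList.foldl (fun d item => d.insert item (d.getD item 0 + 1)) PySem.Dict.empty
  let st := entity.foldl
    (fun (st : PySem.Dict Int Int × List Int) v =>
      let a := pyAbs v
      let c := st.1.getD a 0
      if c > 0 then (st.1.insert a (c - 1), st.2) else (st.1, st.2 ++ [v]))
    (need, ([] : List Int))
  st.2 ++ addList

-- ===== PRECONDITION & SPEC =====
def Spec_updateEntity (addList : List Int) (delList : List Int) (entity : List Int) (out : List Int) : Prop := out = updateEntity_alt addList delList entity
instance (addList : List Int) (delList : List Int) (entity : List Int) (out : List Int) : Decidable (Spec_updateEntity addList delList entity out) := by unfold Spec_updateEntity; infer_instance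

-- ===== CLAIM (what is proved, stated in full; the proofs are below) =====
def Claim_equal_updateEntity : Prop := ∀ (addList : List Int) (delList : List Int) (entity : List Int), Dom_updateEntity addList delList entity → Spec_updateEntity addList delList entity (updateEntity addList delList entity)

-- ===== LEMMAS AND PROOFS =====

-- Abstract single-pass deletion driven by a count function c : abs-value → pending deletions.
def passF (c : Int → Int) : List Int → List Int
  | [] => []
  | v :: vs =>
      if c (pyAbs v) > 0 then passF (fun k => if k = pyAbs v then c k - 1 else c k) vs
      else v :: passF c vs

lemma passF_zero (vs : List Int) : passF (fun _ => 0) vs = vs := by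
  induction vs with
  | nil => rfl
  | cons v vs ih => simp [passF, ih]

-- Key lemma: incrementing the count at `item` deletes one more element, namely the first
-- surviving element with abs = item.
lemma passF_inc (vs : List Int) : ∀ (c : Int → Int), (∀ k, 0 ≤ c k) →
    ∀ item, passF (fun k => if k = item then c k + 1 else c k) vs
      = eraseFirstAbs item (passF c vs) := by
  induction vs with
  | nil => intro c _ item; rfl
  | cons v vs ih =>
    intro c hc item
    by_cases hv : pyAbs v = item
    · have hpos : (if pyAbs v = item then c (pyAbs v) + 1 else c (pyAbs v)) > 0 := by
        rw [if_pos hv, hv]; linarith [hc item]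
      have hfun2 : (fun k => if k = pyAbs v then (if k = item then c k + 1 else c k) - 1
                     else (if k = item then c k + 1 else c k)) = c := by
        funext k
        by_cases h1 : k = pyAbs v
        · have h2 : k = item := h1.trans hv
          simp only [h1, hv, if_pos]; omega
        · have h2 : ¬ k = item := fun h => h1 (h.trans hv.symm)
          simp [h1, h2]
      simp only [passF]
      rw [if_pos hpos, hfun2]
      by_cases hci : c item > 0
      · have hdec : ∀ k, 0 ≤ (fun k => if k = item then c k - 1 else c k) k := by
          intro k; by_cases h : k = item
          · simp only [h, if_pos]; omega
          · simp only [if_neg h]; exact hc k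
        have hIH := ih (fun k => if k = item then c k - 1 else c k) hdec item
        have hfun : (fun k => if k = item then (if k = item then c k - 1 else c k) + 1
                     else (if k = item then c k - 1 else c k)) = c := by
          funext k; by_cases h : k = item <;> simp [h]
        rw [hfun] at hIH
        rw [if_pos (show c (pyAbs v) > 0 from hv ▸ hci),
            show (fun k => if k = pyAbs v then c k - 1 else c k)
               = (fun k => if k = item then c k - 1 else c k) from hv ▸ rfl]
        exact hIH
      · have hc0 : c (pyAbs v) = 0 := by rw [hv]; have := hc item; omega
        rw [if_neg (show ¬ c (pyAbs v) > 0 from by omega)]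
        simp [eraseFirstAbs, hv]
    · have hcond : (if pyAbs v = item then c (pyAbs v) + 1 else c (pyAbs v)) = c (pyAbs v) :=
        if_neg hv
      by_cases hp : c (pyAbs v) > 0
      · have hdec : ∀ k, 0 ≤ (fun k => if k = pyAbs v then c k - 1 else c k) k := by
          intro k; by_cases h : k = pyAbs v
          · simp only [h, if_pos]; omega
          · simp only [if_neg h]; exact hc k
        have hIH := ih (fun k => if k = pyAbs v then c k - 1 else c k) hdec item
        have hfun : (fun k => if k = pyAbs v then (if k = item then c k + 1 else c k) - 1
                     else (if k = item then c k + 1 else c k))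
                  = (fun k => if k = item then (if k = pyAbs v then c k - 1 else c k) + 1
                     else (if k = pyAbs v then c k - 1 else c k)) := by
          funext k
          by_cases h1 : k = pyAbs v
          · have h2 : ¬ k = item := fun h => hv (h1.symm.trans h)
            simp [h1, hv]
          · have h3 : ¬ item = pyAbs v := fun h => hv h.symm
            by_cases h2 : k = item <;> simp [h1, h2, h3]
        simp only [passF]
        rw [hcond, if_pos hp, if_pos hp, hfun, hIH]
      · simp only [passF]
        rw [hcond, if_neg hp, if_neg hp, ih c hc item]
        simp [eraseFirstAbs, hv]

-- Folding eraseFirstAbs over delList equals the counted single pass.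
lemma foldl_erase_eq_passF (ds : List Int) : ∀ (c : Int → Int) (e : List Int), (∀ k, 0 ≤ c k) →
    passF (ds.foldl (fun c item => fun k => if k = item then c k + 1 else c k) c) e
      = ds.foldl (fun e item => eraseFirstAbs item e) (passF c e) := by
  induction ds with
  | nil => intro c e _; rfl
  | cons d ds ih =>
    intro c e hc
    have hinc : ∀ k, 0 ≤ (fun k => if k = d then c k + 1 else c k) k := by
      intro k; by_cases h : k = d
      · have := hc d; simp only [h, if_pos]; omega
      · simp only [if_neg h]; exact hc k
    simp only [List.foldl_cons]
    rw [ih _ e hinc, passF_inc e c hc d]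

-- The Dict-based sweep fold of port B computes acc ++ passF (getD view of the dict).
lemma foldl_sweep_eq_passF (vs : List Int) : ∀ (d : PySem.Dict Int Int) (acc : List Int),
    (vs.foldl
      (fun (st : PySem.Dict Int Int × List Int) v =>
        let a := pyAbs v
        let c := st.1.getD a 0
        if c > 0 then (st.1.insert a (c - 1), st.2) else (st.1, st.2 ++ [v]))
      (d, acc)).2
    = acc ++ passF (fun k => d.getD k 0) vs := by
  induction vs with
  | nil => intro d acc; simp [passF]
  | cons v vs ih =>
    intro d acc
    by_cases h : d.getD (pyAbs v) 0 > 0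
    · have hfun : (fun k => (d.insert (pyAbs v) (d.getD (pyAbs v) 0 - 1)).getD k 0)
          = (fun k => if k = pyAbs v then (fun k => d.getD k 0) k - 1 else (fun k => d.getD k 0) k) := by
        funext k; rw [PySem.Dict.getD_insert]; split_ifs with hk <;> simp [hk]
      simp only [List.foldl_cons, h, if_pos]
      rw [ih, passF, if_pos h, hfun]
    · simp only [List.foldl_cons, h, if_false]
      rw [ih, passF, if_neg h]
      simp

-- The counter dict of port B, viewed through getD, is the abstract count function.
lemma counter_view (ds : List Int) :
    (fun k => (ds.foldl (fun d item => d.insert item (d.getD item 0 + 1))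
        (PySem.Dict.empty : PySem.Dict Int Int)).getD k 0)
    = ds.foldl (fun c item => fun k => if k = item then c k + 1 else c k) (fun _ => 0) := by
  have hf : ∀ (c : Int → Int) k, ds.foldl (fun c item => fun k => if k = item then c k + 1 else c k) c k
      = c k + ds.count k := by
    intro c k
    induction ds generalizing c with
    | nil => simp
    | cons d ds ih =>
      simp only [List.foldl_cons, ih, List.count_cons]
      by_cases h : k = d
      · simp [h]; omega
      · have : ¬ (d = k) := fun hh => h hh.symm
        simp [h, this]
  funext k
  rw [PySem.Dict.getD_foldl_insert_add_one, PySem.Dict.getD_empty, hf]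

-- ===== VERDICT (by name: the statement is the Claim_ definition above) =====
theorem updateEntity_spec : Claim_equal_updateEntity := by
  intro addList delList entity _
  unfold Spec_updateEntity
  simp only [updateEntity, updateEntity_alt]
  rw [foldl_sweep_eq_passF, counter_view, foldl_erase_eq_passF _ _ _ (fun _ => le_refl 0),
    passF_zero]
  simp
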